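-- pv_equiv track=rewrite | github.com/cosmic-boy0111/Preparation | Amazon/Dynamic Programming/1.py | solve
-- ===== SOURCE A (Python) =====
-- def solve(n,l1,l2):
--     ans = []
--     d = dict();
--     for i in range(0,n):
--         d[l1[i]] = [];
--
--     for i in range(0,n):
--         d[l1[i]].append(l2[i])
--
--     for key, value in d.items():
--         d[key] = sum(value)//len(value)
--
--
--     for i in range(0,n):
--         ans.append(l2[i]-d[l1[i]])
--
--     return ans
-- ===== SOURCE B (Python) =====
-- def solve(n, l1, l2):
--     # Dict-free brute force: for each position, rescan the whole input to
--     # accumulate the sum and count of values sharing its key, no grouping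
--     # structure is ever built.
--     ans = []
--     for i in range(0, n):
--         s = 0
--         c = 0
--         for j in range(0, n):
--             if l1[j] == l1[i]:
--                 s += l2[j]
--                 c += 1
--         ans.append(l2[i] - s // c)
--     return ans
-- ===== Notes on version B (the rewrite author's own statement) =====
-- stated objective: alternative
-- what changed: B drops A's dict-based grouping entirely: instead of building per-key value lists and reducing them to averages, it does a brute-force nested scan that, for each index, re-accumulates the matching sum and count directly; it trades O(n) with hashing for a structure-free O(n^2) scan.
import Mathlib
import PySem

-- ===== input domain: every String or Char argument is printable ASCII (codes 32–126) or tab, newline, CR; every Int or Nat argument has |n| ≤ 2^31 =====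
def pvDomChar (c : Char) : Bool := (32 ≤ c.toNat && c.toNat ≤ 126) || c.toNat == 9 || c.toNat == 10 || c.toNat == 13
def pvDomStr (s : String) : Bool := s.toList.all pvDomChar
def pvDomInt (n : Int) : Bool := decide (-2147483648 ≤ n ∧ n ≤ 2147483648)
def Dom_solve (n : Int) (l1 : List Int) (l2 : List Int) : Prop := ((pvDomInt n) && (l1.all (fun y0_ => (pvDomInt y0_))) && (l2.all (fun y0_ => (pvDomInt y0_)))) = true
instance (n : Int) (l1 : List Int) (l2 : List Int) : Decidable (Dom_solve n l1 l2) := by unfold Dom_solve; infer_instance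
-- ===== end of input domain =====

-- B replaces A's dict-based grouping (per-key value lists, then a reduction to
-- averages) by a structure-free brute-force nested scan: for each index it
-- re-accumulates the matching sum and count directly (an alternative, O(n^2)).

-- ===== PORT A =====
-- Loop 3 reassigns each existing key in place; since the stored type changes from
-- List Int to Int, the port rebuilds the same-key-order Int-valued dict by folding
-- insert over the items list (exactly Python's key order).
-- Loop 2's d[l1[i]].append can never raise KeyError (loop 1 inserted every key), so
-- modify with default [] is exact; pyGetD is exact under Pre_solve (indices in range).
def solve (n : Int) (l1 : List Int) (l2 : List Int) : List Int :=
  let idxs := PySem.List.pyRange 0 n 1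
  let d0 : PySem.Dict Int (List Int) :=
    idxs.foldl (fun d i => d.insert (PySem.List.pyGetD l1 i 0) []) PySem.Dict.empty
  let d1 :=
    idxs.foldl (fun d i => d.modify (PySem.List.pyGetD l1 i 0) [] (· ++ [PySem.List.pyGetD l2 i 0])) d0
  let d2 : PySem.Dict Int Int :=
    d1.items.foldl (fun d p => d.insert p.1 (PySem.Int.floordiv p.2.sum p.2.length)) PySem.Dict.empty
  idxs.foldl (fun ans i => ans ++ [PySem.List.pyGetD l2 i 0 - d2.getD (PySem.List.pyGetD l1 i 0) 0]) []

-- ===== PORT B =====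
def solve_alt (n : Int) (l1 : List Int) (l2 : List Int) : List Int :=
  let idxs := PySem.List.pyRange 0 n 1
  idxs.foldl
    (fun ans i =>
      let sc :=
        idxs.foldl
          (fun (p : Int × Int) j =>
            if PySem.List.pyGetD l1 j 0 = PySem.List.pyGetD l1 i 0 then
              (p.1 + PySem.List.pyGetD l2 j 0, p.2 + 1)
            else p)
          (0, 0)
      ans ++ [PySem.List.pyGetD l2 i 0 - PySem.Int.floordiv sc.1 sc.2]) []

-- ===== PRECONDITION & SPEC =====
-- Pre_ excludes exactly the inputs where Python A raises IndexError: n larger than a list's length.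
def Pre_solve (n : Int) (l1 : List Int) (l2 : List Int) : Prop :=
  n ≤ (l1.length : Int) ∧ n ≤ (l2.length : Int)
instance (n : Int) (l1 : List Int) (l2 : List Int) : Decidable (Pre_solve n l1 l2) := by unfold Pre_solve; infer_instance
def pvWitness_solve : Int × List Int × List Int := (3, [1, 2, 1], [4, 7, 9])

def Spec_solve (n : Int) (l1 : List Int) (l2 : List Int) (out : List Int) : Prop := out = solve_alt n l1 l2
instance (n : Int) (l1 : List Int) (l2 : List Int) (out : List Int) : Decidable (Spec_solve n l1 l2 out) := by unfold Spec_solve; infer_instance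

-- ===== CLAIM (what is proved, stated in full; the proofs are below) =====
def Claim_equal_solve : Prop := ∀ (n : Int) (l1 : List Int) (l2 : List Int), Dom_solve n l1 l2 → Pre_solve n l1 l2 → Spec_solve n l1 l2 (solve n l1 l2)

-- ===== LEMMAS AND PROOFS =====

def pvKey (l1 : List Int) (j : Nat) : Int := l1.getD j 0
def pvVal (l2 : List Int) (j : Nat) : Int := l2.getD j 0

-- the values l2[j] at indices j < m whose key l1[j] equals k (A's d[k] after loop 2)
def pvGrp (l1 l2 : List Int) (m : Nat) (k : Int) : List Int :=
  ((List.range m).filter (fun j => pvKey l1 j == k)).map (pvVal l2)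

theorem pvGrp_succ (l1 l2 : List Int) (m : Nat) (k : Int) :
    pvGrp l1 l2 (m + 1) k =
      pvGrp l1 l2 m k ++ (if pvKey l1 m = k then [pvVal l2 m] else []) := by
  simp only [pvGrp, List.range_succ, List.filter_append, List.map_append]
  congr 1
  by_cases h : pvKey l1 m = k
  · simp [h]
  · simp [h]

theorem pvIdx (n : Int) :
    PySem.List.pyRange 0 n 1 = (List.range n.toNat).map (Nat.cast : Nat → Int) := by
  rw [PySem.List.pyRange_one]
  simp only [Int.sub_zero]
  exact List.map_congr_left (fun a _ => zero_add ((a : Int)))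

theorem pvD0_getD (l1 : List Int) (m : Nat) (d : PySem.Dict Int (List Int))
    (h : ∀ k, d.getD k [] = []) (k : Int) :
    ((List.range m).foldl (fun d j => d.insert (pvKey l1 j) []) d).getD k [] = [] := by
  induction m with
  | zero => simpa using h k
  | succ m ih =>
      rw [List.range_succ, List.foldl_append]
      simp only [List.foldl_cons, List.foldl_nil, PySem.Dict.getD_insert]
      split
      · rfl
      · exact ih

theorem pvD1_getD (l1 l2 : List Int) (m : Nat) (d : PySem.Dict Int (List Int)) (k : Int) :
    ((List.range m).foldl
        (fun d j => d.modify (pvKey l1 j) [] (· ++ [pvVal l2 j])) d).getD k [] =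
      d.getD k [] ++ pvGrp l1 l2 m k := by
  induction m with
  | zero => simp [pvGrp]
  | succ m ih =>
      rw [List.range_succ, List.foldl_append]
      simp only [List.foldl_cons, List.foldl_nil, PySem.Dict.getD_modify, pvGrp_succ]
      by_cases h : k = pvKey l1 m
      · subst h
        rw [if_pos rfl, if_pos rfl, ih, List.append_assoc]
      · have h2 : ¬ pvKey l1 m = k := fun h' => h h'.symm
        rw [if_neg h, if_neg h2, ih, List.append_nil]

-- B's inner scan accumulates exactly the sum and length of pvGrp
theorem pvB_inner (l1 l2 : List Int) (k : Int) (m : Nat) (p : Int × Int) :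
    (List.range m).foldl
        (fun (p : Int × Int) j =>
          if pvKey l1 j = k then (p.1 + pvVal l2 j, p.2 + 1) else p) p =
      (p.1 + (pvGrp l1 l2 m k).sum, p.2 + ((pvGrp l1 l2 m k).length : Int)) := by
  induction m with
  | zero => simp [pvGrp]
  | succ m ih =>
      rw [List.range_succ, List.foldl_append]
      simp only [List.foldl_cons, List.foldl_nil, pvGrp_succ]
      by_cases h : pvKey l1 m = k
      · rw [if_pos h, ih]
        simp [h]; constructor <;> ring
      · rw [if_neg h, ih]
        simp [h]

-- bridge: the A-side dict after loops 1+2 (in port form) looked up at k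
theorem pvA_getD (n : Int) (l1 l2 : List Int) (k : Int) :
    ((PySem.List.pyRange 0 n 1).foldl
        (fun d i => d.modify (PySem.List.pyGetD l1 i 0) [] (· ++ [PySem.List.pyGetD l2 i 0]))
        ((PySem.List.pyRange 0 n 1).foldl
          (fun d i => d.insert (PySem.List.pyGetD l1 i 0) []) PySem.Dict.empty)).getD k [] =
      pvGrp l1 l2 n.toNat k := by
  rw [pvIdx, List.foldl_map, List.foldl_map]
  simp only [PySem.List.pyGetD_natCast]
  rw [show (fun (d : PySem.Dict Int (List Int)) (y : Nat) =>
        d.modify (l1.getD y 0) [] (· ++ [l2.getD y 0])) =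
      (fun d y => d.modify (pvKey l1 y) [] (· ++ [pvVal l2 y])) from rfl]
  rw [pvD1_getD]
  rw [show (fun (d : PySem.Dict Int (List Int)) (y : Nat) => d.insert (l1.getD y 0) []) =
      (fun d y => d.insert (pvKey l1 y) []) from rfl]
  rw [pvD0_getD l1 n.toNat PySem.Dict.empty (fun k => by simp [PySem.Dict.getD_empty])]
  simp

theorem pvA_nodup (n : Int) (l1 l2 : List Int) :
    ((PySem.List.pyRange 0 n 1).foldl
        (fun d i => d.modify (PySem.List.pyGetD l1 i 0) [] (· ++ [PySem.List.pyGetD l2 i 0]))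
        ((PySem.List.pyRange 0 n 1).foldl
          (fun d i => d.insert (PySem.List.pyGetD l1 i 0) []) PySem.Dict.empty)).keys.Nodup := by
  apply PySem.Dict.nodup_keys_foldl_modify_key _ (fun i => PySem.List.pyGetD l1 i 0) []
    (fun _ i v => v ++ [PySem.List.pyGetD l2 i 0])
  exact PySem.Dict.nodup_keys_foldl_insert_key _ (fun i => PySem.List.pyGetD l1 i 0)
    (fun _ _ => []) _ PySem.Dict.nodup_keys_empty

theorem pvA_mem (n : Int) (l1 l2 : List Int) (i : Int) (hi : i ∈ PySem.List.pyRange 0 n 1) :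
    PySem.List.pyGetD l1 i 0 ∈
      ((PySem.List.pyRange 0 n 1).foldl
        (fun d i => d.modify (PySem.List.pyGetD l1 i 0) [] (· ++ [PySem.List.pyGetD l2 i 0]))
        ((PySem.List.pyRange 0 n 1).foldl
          (fun d i => d.insert (PySem.List.pyGetD l1 i 0) []) PySem.Dict.empty)).keys := by
  rw [PySem.Dict.keys_foldl_modify_key _ (fun i => PySem.List.pyGetD l1 i 0) []
    (fun _ i v => v ++ [PySem.List.pyGetD l2 i 0])]
  rw [PySem.Set.mem_update]
  exact Or.inr (List.mem_map.mpr ⟨i, hi, rfl⟩)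

-- B's per-index value in pvGrp form
theorem pvB_elem (n : Int) (l1 l2 : List Int) (i : Int) :
    ((PySem.List.pyRange 0 n 1).foldl
        (fun (p : Int × Int) j =>
          if PySem.List.pyGetD l1 j 0 = PySem.List.pyGetD l1 i 0 then
            (p.1 + PySem.List.pyGetD l2 j 0, p.2 + 1)
          else p)
        (0, 0)) =
      ((pvGrp l1 l2 n.toNat (PySem.List.pyGetD l1 i 0)).sum,
       ((pvGrp l1 l2 n.toNat (PySem.List.pyGetD l1 i 0)).length : Int)) := by
  rw [pvIdx, List.foldl_map]
  simp only [PySem.List.pyGetD_natCast]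
  have h := pvB_inner l1 l2 (PySem.List.pyGetD l1 i 0) n.toNat (0, 0)
  simp only [pvKey, pvVal] at h
  rw [h]
  simp

theorem pv_main (n : Int) (l1 l2 : List Int) : solve n l1 l2 = solve_alt n l1 l2 := by
  unfold solve solve_alt
  simp only [PySem.List.foldl_append_singleton_eq_map, List.nil_append]
  apply List.map_congr_left
  intro i hi
  set k := PySem.List.pyGetD l1 i 0 with hk
  have hd1get := pvA_getD n l1 l2 k
  have hd1nodup := pvA_nodup n l1 l2
  have hkmem := pvA_mem n l1 l2 i hi
  set d1 := ((PySem.List.pyRange 0 n 1).foldl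
      (fun d i => d.modify (PySem.List.pyGetD l1 i 0) [] (· ++ [PySem.List.pyGetD l2 i 0]))
      ((PySem.List.pyRange 0 n 1).foldl
        (fun d i => d.insert (PySem.List.pyGetD l1 i 0) []) PySem.Dict.empty)) with hd1
  have hget? : d1.get? k = some (pvGrp l1 l2 n.toNat k) := by
    rcases h : d1.get? k with _ | v
    · exact absurd ((PySem.Dict.get?_eq_none_iff_not_mem_keys d1 k).mp h) (by simpa using hkmem)
    · have h2 := PySem.Dict.getD_of_get?_eq_some d1 [] h
      rw [hd1get] at h2
      rw [h2]
  have hitems : (k, pvGrp l1 l2 n.toNat k) ∈ d1.items :=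
    (PySem.Dict.get?_eq_some_iff_mem_items d1 k _ hd1nodup).mp hget?
  have hfstnodup : (d1.items.map Prod.fst).Nodup := by
    simpa [PySem.Dict.keys] using hd1nodup
  have hd2items :
      (d1.items.foldl
        (fun d p => d.insert p.1 (PySem.Int.floordiv p.2.sum p.2.length)) PySem.Dict.empty).items =
      d1.items.map (fun p => (p.1, PySem.Int.floordiv p.2.sum (p.2.length : Int))) := by
    rw [PySem.Dict.items_foldl_insert_fresh d1.items Prod.fst
      (fun p => PySem.Int.floordiv p.2.sum p.2.length) PySem.Dict.empty
      (fun _ _ => PySem.Dict.contains_empty _) hfstnodup]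
    simp [PySem.Dict.empty]
  have hd2nodup :
      (d1.items.foldl
        (fun d p => d.insert p.1 (PySem.Int.floordiv p.2.sum p.2.length)) PySem.Dict.empty).keys.Nodup := by
    simp only [PySem.Dict.keys, hd2items, List.map_map]
    simpa [Function.comp_def, PySem.Dict.keys] using hd1nodup
  have hd2get :
      (d1.items.foldl
        (fun d p => d.insert p.1 (PySem.Int.floordiv p.2.sum p.2.length)) PySem.Dict.empty).getD k 0 =
      PySem.Int.floordiv (pvGrp l1 l2 n.toNat k).sum ((pvGrp l1 l2 n.toNat k).length : Int) := by
    refine PySem.Dict.getD_of_mem_items _ ?_ hd2nodup 0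
    rw [hd2items]
    exact List.mem_map.mpr ⟨(k, pvGrp l1 l2 n.toNat k), hitems, rfl⟩
  rw [hd2get, pvB_elem n l1 l2 i]

-- ===== VERDICT (by name: the statement is the Claim_ definition above) =====
theorem solve_spec : Claim_equal_solve := by
  intro n l1 l2 _ _
  unfold Spec_solve
  exact pv_main n l1 l2
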